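-- pv_equiv track=rewrite | github.com/josephcolton/ooolib-python | code/ooolibCalcContent.py | convertCellId2RowCol
-- ===== SOURCE A (Python) =====
-- def convertCellId2RowCol(cellId):
--     row = 0
--     col = 0
--     chars = list(cellId)
--     while(chars):
--         ch = chars.pop(0)
--         if ch.isalpha():
--             ch = ch.upper()
--             chValue = ord(ch) - 64
--             col *= 26
--             col += chValue
--         if ch.isdigit():
--             chValue = ord(ch) - 48
--             row *= 10
--             row += chValue
--     # Should have row and col calculated
--     return (row, col)
-- ===== SOURCE B (Python) =====
-- def convertCellId2RowCol(cellId):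
--     # Two independent filtered passes (letters -> col, digits -> row) instead of one interleaved scan.
--     letters = [ch for ch in cellId if ch.isalpha()]
--     digits = [ch for ch in cellId if ch.isdigit()]
--     col = 0
--     for ch in letters:
--         col = col * 26 + (ord(ch.upper()) - 64)
--     row = 0
--     for ch in digits:
--         row = row * 10 + (ord(ch) - 48)
--     return (row, col)
-- ===== Notes on version B (the rewrite author's own statement) =====
-- stated objective: simpler
-- what changed: Replaces the single interleaved pop-from-front while-loop with two independent filtered passes: fold the alphabetic characters into col and the digit characters into row.
import Mathlib
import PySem

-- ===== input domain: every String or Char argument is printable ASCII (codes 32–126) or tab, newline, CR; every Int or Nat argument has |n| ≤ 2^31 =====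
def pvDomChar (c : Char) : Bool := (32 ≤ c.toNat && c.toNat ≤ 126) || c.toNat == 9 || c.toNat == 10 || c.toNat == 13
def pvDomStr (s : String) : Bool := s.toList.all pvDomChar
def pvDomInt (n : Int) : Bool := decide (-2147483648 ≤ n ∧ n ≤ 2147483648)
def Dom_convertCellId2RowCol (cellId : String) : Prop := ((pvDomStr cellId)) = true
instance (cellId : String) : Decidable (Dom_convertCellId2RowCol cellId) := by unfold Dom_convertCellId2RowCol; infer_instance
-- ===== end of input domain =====

-- B replaces A's interleaved pop-from-front loop with two independent filtered folds (letters → col, digits → row); objective: simpler.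

-- ===== PORT A =====
-- the while-loop popping from the front, carrying (row, col); ch may be rebound to its uppercase form
def convertCellId2RowColAux : List Char → Int → Int → Int × Int
  | [], row, col => (row, col)
  | ch :: chars, row, col =>
    let p : Char × Int :=
      if PySem.Chars.isalpha ch then
        let ch' := PySem.Chars.upperChar ch
        (ch', col * 26 + (((ch'.toNat : Int)) - 64))
      else (ch, col)
    let row' := if PySem.Chars.isdigit p.1 then row * 10 + (((p.1.toNat : Int)) - 48) else row
    convertCellId2RowColAux chars row' p.2

def convertCellId2RowCol (cellId : String) : Int × Int :=
  convertCellId2RowColAux cellId.toList 0 0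

-- ===== PORT B =====
def convertCellId2RowCol_alt (cellId : String) : Int × Int :=
  let letters := cellId.toList.filter PySem.Chars.isalpha
  let digits := cellId.toList.filter PySem.Chars.isdigit
  let col := letters.foldl (fun c ch => c * 26 + (((PySem.Chars.upperChar ch).toNat : Int) - 64)) 0
  let row := digits.foldl (fun r ch => r * 10 + (((ch.toNat : Int)) - 48)) 0
  (row, col)

-- ===== PRECONDITION & SPEC =====
def Spec_convertCellId2RowCol (cellId : String) (out : Int × Int) : Prop := out = convertCellId2RowCol_alt cellId
instance (cellId : String) (out : Int × Int) : Decidable (Spec_convertCellId2RowCol cellId out) := by unfold Spec_convertCellId2RowCol; infer_instance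

-- ===== CLAIM (what is proved, stated in full; the proofs are below) =====
def Claim_equal_convertCellId2RowCol : Prop := ∀ (cellId : String), Dom_convertCellId2RowCol cellId → Spec_convertCellId2RowCol cellId (convertCellId2RowCol cellId)

-- ===== LEMMAS AND PROOFS =====

theorem pv_isdigit_iff (c : Char) : PySem.Chars.isdigit c = true ↔ (48 ≤ c.toNat ∧ c.toNat ≤ 57) := by
  simp only [PySem.Chars.isdigit, Bool.and_eq_true, decide_eq_true_eq, Char.le_def,
    UInt32.le_iff_toNat_le]
  have h0 : ('0').val.toNat = 48 := rfl
  have h9 : ('9').val.toNat = 57 := rfl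
  have hc : Char.toNat c = c.val.toNat := rfl
  omega

theorem pv_islower_iff (c : Char) : PySem.Chars.islower c = true ↔ (97 ≤ c.toNat ∧ c.toNat ≤ 122) := by
  simp only [PySem.Chars.islower, Bool.and_eq_true, decide_eq_true_eq, Char.le_def,
    UInt32.le_iff_toNat_le]
  have ha : ('a').val.toNat = 97 := rfl
  have hz : ('z').val.toNat = 122 := rfl
  have hc : Char.toNat c = c.val.toNat := rfl
  omega

theorem pv_isupper_iff (c : Char) : PySem.Chars.isupper c = true ↔ (65 ≤ c.toNat ∧ c.toNat ≤ 90) := by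
  simp only [PySem.Chars.isupper, Bool.and_eq_true, decide_eq_true_eq, Char.le_def,
    UInt32.le_iff_toNat_le]
  have hA : ('A').val.toNat = 65 := rfl
  have hZ : ('Z').val.toNat = 90 := rfl
  have hc : Char.toNat c = c.val.toNat := rfl
  omega

theorem pv_toNat_ofNat (m : Nat) (h : m < 128) : (Char.ofNat m).toNat = m := by
  have hv : Nat.isValidChar m := Or.inl (by omega)
  rw [Char.toNat_ofNat]
  simp [hv]

theorem pv_isdigit_upperChar (c : Char) : PySem.Chars.isdigit (PySem.Chars.upperChar c) = PySem.Chars.isdigit c := by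
  by_cases h : PySem.Chars.islower c = true
  · have hb := (pv_islower_iff c).mp h
    have hup : PySem.Chars.upperChar c = Char.ofNat (c.toNat - 32) := by
      simp [PySem.Chars.upperChar, h]
    have ht : (Char.ofNat (c.toNat - 32)).toNat = c.toNat - 32 := pv_toNat_ofNat _ (by omega)
    have l : PySem.Chars.isdigit (Char.ofNat (c.toNat - 32)) = false := by
      rw [← Bool.not_eq_true, pv_isdigit_iff, ht]; omega
    have r : PySem.Chars.isdigit c = false := by
      rw [← Bool.not_eq_true, pv_isdigit_iff]; omega
    rw [hup, l, r]
  · have hup : PySem.Chars.upperChar c = c := by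
      simp [PySem.Chars.upperChar, h]
    rw [hup]

theorem pv_alpha_not_digit (c : Char) (h : PySem.Chars.isalpha c = true) :
    PySem.Chars.isdigit c = false := by
  have : PySem.Chars.isupper c = true ∨ PySem.Chars.islower c = true := by
    simpa [PySem.Chars.isalpha] using h
  rw [← Bool.not_eq_true, pv_isdigit_iff]
  rcases this with h' | h'
  · have := (pv_isupper_iff c).mp h'; omega
  · have := (pv_islower_iff c).mp h'; omega

theorem pv_aux_eq (l : List Char) (row col : Int) :
    convertCellId2RowColAux l row col =
      ((l.filter PySem.Chars.isdigit).foldl (fun r ch => r * 10 + (((ch.toNat : Int)) - 48)) row,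
       (l.filter PySem.Chars.isalpha).foldl (fun c ch => c * 26 + (((PySem.Chars.upperChar ch).toNat : Int) - 64)) col) := by
  induction l generalizing row col with
  | nil => rfl
  | cons ch rest ih =>
    by_cases ha : PySem.Chars.isalpha ch = true
    · have hd : PySem.Chars.isdigit (PySem.Chars.upperChar ch) = false := by
        rw [pv_isdigit_upperChar]; exact pv_alpha_not_digit ch ha
      simp [convertCellId2RowColAux, ha, hd, pv_alpha_not_digit ch ha, ih]
    · by_cases hdg : PySem.Chars.isdigit ch = true <;>
        simp [convertCellId2RowColAux, ha, hdg, ih]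

-- ===== VERDICT (by name: the statement is the Claim_ definition above) =====
theorem convertCellId2RowCol_spec : Claim_equal_convertCellId2RowCol := by
  intro cellId _
  unfold Spec_convertCellId2RowCol convertCellId2RowCol convertCellId2RowCol_alt
  simp [pv_aux_eq]
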